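-- pv_equiv track=rewrite | github.com/montrealrobotics/AnyMorph | plot_section_three_v2.py | pretty
-- ===== SOURCE A (Python) =====
-- def pretty(text):
--     """Convert a string into a consistent format for
--     presentation in a matplotlib pyplot:
--
--     this version looks like: One Two Three Four
--
--     """
--
--     text = text.replace("_", " ")
--     text = text.replace("-", " ")
--     text = text.strip()
--     prev_c = None
--     out_str = []
--     for c in text:
--         if prev_c is not None and \
--                 prev_c.islower() and c.isupper():
--             out_str.append(" ")
--             prev_c = " "
--         if prev_c is None or prev_c == " ":
--             c = c.upper()
--         out_str.append(c)
--         prev_c = c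
--     return "".join(out_str)
-- ===== SOURCE B (Python) =====
-- def _word(w):
--     # Title-case one space-free chunk: uppercase its first character and insert a
--     # space between every islower->isupper adjacent pair except right after the head.
--     if not w:
--         return ""
--     if len(w) == 1:
--         return w[0].upper()
--     gaps = "".join((" " + b) if a.islower() and b.isupper() else b
--                    for a, b in zip(w[1:], w[2:]))
--     return w[0].upper() + w[1] + gaps
--
-- def pretty(text):
--     text = text.replace("_", " ")
--     text = text.replace("-", " ")
--     text = text.strip()
--     return " ".join(_word(w) for w in text.split(" "))
-- ===== Notes on version B (the rewrite author's own statement) =====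
-- stated objective: alternative
-- what changed: Replaces A's single stateful character loop (prev_c state machine) with a split-on-space / per-word rewrite / join decomposition: each space-free chunk is rewritten by a closed rule (uppercase the head, insert a space at every islower->isupper adjacent pair past the head, taken from a zip of the tail with its own tail).
import Mathlib
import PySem

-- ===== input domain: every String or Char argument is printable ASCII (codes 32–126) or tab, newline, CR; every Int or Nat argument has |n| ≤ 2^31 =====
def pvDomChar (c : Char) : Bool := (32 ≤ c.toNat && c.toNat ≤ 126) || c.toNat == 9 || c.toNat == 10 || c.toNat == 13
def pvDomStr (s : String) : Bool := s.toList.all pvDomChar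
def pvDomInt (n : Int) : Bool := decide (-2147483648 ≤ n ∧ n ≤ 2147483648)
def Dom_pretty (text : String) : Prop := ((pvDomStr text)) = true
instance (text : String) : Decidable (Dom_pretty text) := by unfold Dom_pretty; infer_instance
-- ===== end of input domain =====

-- B title-cases by decomposition — split on spaces, rewrite each chunk by a closed per-word
-- rule, join — instead of A's single stateful character loop. Objective: alternative.

-- ===== PORT A =====
-- one iteration of A's for-loop; state = (prev_c, out_str)
def prettyStep (st : Option Char × List Char) (c : Char) : Option Char × List Char :=
  let pair :=
    if (match st.1 with | some p => PySem.Chars.islower p | none => false)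
        && PySem.Chars.isupper c then
      ((some ' ' : Option Char), st.2 ++ [' '])
    else (st.1, st.2)
  let c' := if pair.1 = none ∨ pair.1 = some ' ' then PySem.Chars.upperChar c else c
  (some c', pair.2 ++ [c'])

def pretty (text : String) : String :=
  let t0 := text.toList
  let t1 := PySem.Chars.replace t0 ['_'] [' ']
  let t2 := PySem.Chars.replace t1 ['-'] [' ']
  let t3 := PySem.Chars.strip t2
  String.mk ((t3.foldl prettyStep ((none : Option Char), ([] : List Char))).2)

-- ===== PORT B =====
-- _word from Source B: uppercase the head; "gaps" from the zip of the tail with its own tail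
def prettyWord (w : List Char) : List Char :=
  match w with
  | [] => []
  | [c] => [PySem.Chars.upperChar c]
  | c0 :: c1 :: rest =>
      PySem.Chars.upperChar c0 :: c1 ::
        (((c1 :: rest).zip rest).flatMap (fun ab =>
          if PySem.Chars.islower ab.1 && PySem.Chars.isupper ab.2 then [' ', ab.2] else [ab.2]))

def pretty_alt (text : String) : String :=
  let t0 := text.toList
  let t1 := PySem.Chars.replace t0 ['_'] [' ']
  let t2 := PySem.Chars.replace t1 ['-'] [' ']
  let t3 := PySem.Chars.strip t2
  String.mk (PySem.Chars.join [' '] ((PySem.Chars.splitOn t3 [' ']).map prettyWord))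

-- ===== PRECONDITION & SPEC =====
def Spec_pretty (text : String) (out : String) : Prop := out = pretty_alt text
instance (text : String) (out : String) : Decidable (Spec_pretty text out) := by unfold Spec_pretty; infer_instance

-- ===== CLAIM (what is proved, stated in full; the proofs are below) =====
def Claim_equal_pretty : Prop := ∀ (text : String), Dom_pretty text → Spec_pretty text (pretty text)

-- ===== LEMMAS AND PROOFS =====

-- ASCII character facts
theorem islower_bounds (c : Char) (h : PySem.Chars.islower c = true) :
    97 ≤ c.val.toNat ∧ c.val.toNat ≤ 122 := by
  unfold PySem.Chars.islower at h
  simp only [Bool.and_eq_true, decide_eq_true_eq, Char.le_def, UInt32.le_iff_toNat_le] at h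
  rw [show 'a'.val.toNat = 97 from rfl, show 'z'.val.toNat = 122 from rfl] at h
  exact h

theorem toNat_upperChar (c : Char) (h : PySem.Chars.islower c = true) :
    (PySem.Chars.upperChar c).val.toNat = c.val.toNat - 32 := by
  have hb := islower_bounds c h
  unfold PySem.Chars.upperChar
  rw [if_pos h]
  have : (Char.ofNat (c.toNat - 32)).toNat = c.toNat - 32 := by
    rw [Char.toNat_ofNat, if_pos (Or.inl (by simp only [Char.toNat]; omega))]
  exact this

theorem islower_upperChar (c : Char) : PySem.Chars.islower (PySem.Chars.upperChar c) = false := by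
  by_cases h : PySem.Chars.islower c
  · have hb := islower_bounds c h
    have ht := toNat_upperChar c h
    unfold PySem.Chars.islower
    simp only [Bool.and_eq_false_iff, decide_eq_false_iff_not, Char.le_def, UInt32.le_iff_toNat_le]
    left
    rw [show 'a'.val.toNat = 97 from rfl, ht]
    omega
  · unfold PySem.Chars.upperChar
    rw [if_neg h]
    simpa using h

theorem upperChar_of_isupper (c : Char) (h : PySem.Chars.isupper c = true) :
    PySem.Chars.upperChar c = c := by
  unfold PySem.Chars.isupper at h
  simp only [Bool.and_eq_true, decide_eq_true_eq, Char.le_def, UInt32.le_iff_toNat_le] at h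
  rw [show 'A'.val.toNat = 65 from rfl, show 'Z'.val.toNat = 90 from rfl] at h
  have hl : PySem.Chars.islower c = false := by
    by_contra hc
    have := islower_bounds c (by simpa using hc)
    omega
  unfold PySem.Chars.upperChar
  rw [if_neg (by simp [hl])]

theorem upperChar_ne_space (c : Char) (h : c ≠ ' ') : PySem.Chars.upperChar c ≠ ' ' := by
  by_cases hl : PySem.Chars.islower c
  · have hb := islower_bounds c hl
    have ht := toNat_upperChar c hl
    intro he
    rw [he, show ' '.val.toNat = 32 from rfl] at ht
    omega
  · unfold PySem.Chars.upperChar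
    rw [if_neg hl]
    exact h

theorem islower_space : PySem.Chars.islower ' ' = false := by decide
theorem isupper_space : PySem.Chars.isupper ' ' = false := by decide
theorem upperChar_space : PySem.Chars.upperChar ' ' = ' ' := by decide

-- recursive form of A's fold
def goA : Option Char → List Char → List Char
  | _, [] => []
  | prev, c :: cs =>
    if (match prev with | some p => PySem.Chars.islower p | none => false)
        && PySem.Chars.isupper c then
      ' ' :: PySem.Chars.upperChar c :: goA (some (PySem.Chars.upperChar c)) cs
    else if prev = none ∨ prev = some ' ' then
      PySem.Chars.upperChar c :: goA (some (PySem.Chars.upperChar c)) cs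
    else
      c :: goA (some c) cs

theorem foldl_goA (l : List Char) : ∀ (st : Option Char × List Char),
    (l.foldl prettyStep st).2 = st.2 ++ goA st.1 l := by
  induction l with
  | nil => intro st; simp [goA]
  | cons c cs ih =>
    intro st
    rw [List.foldl_cons, ih]
    by_cases hs : ((match st.1 with | some p => PySem.Chars.islower p | none => false)
        && PySem.Chars.isupper c) = true
    · have h1 : prettyStep st c =
          (some (PySem.Chars.upperChar c), st.2 ++ [' '] ++ [PySem.Chars.upperChar c]) := by
        unfold prettyStep
        rw [if_pos hs]
        simp
      rw [h1]
      simp only [goA, hs, if_true]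
      simp
    · have hs' := Bool.not_eq_true _ ▸ hs
      by_cases hcond : st.1 = none ∨ st.1 = some ' '
      · have h1 : prettyStep st c =
            (some (PySem.Chars.upperChar c), st.2 ++ [PySem.Chars.upperChar c]) := by
          unfold prettyStep
          rw [if_neg (by simp [hs'])]
          simp only []
          rw [if_pos hcond]
        rw [h1]
        simp only [goA, hs', Bool.false_eq_true, if_false]
        rw [if_pos hcond]
        simp
      · have h1 : prettyStep st c = (some c, st.2 ++ [c]) := by
          unfold prettyStep
          rw [if_neg (by simp [hs'])]
          simp only []
          rw [if_neg hcond]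
        rw [h1]
        simp only [goA, hs', Bool.false_eq_true, if_false]
        rw [if_neg hcond]
        simp

-- structural specification of Python's split(" ")
def splitSp : List Char → List (List Char)
  | [] => [[]]
  | c :: cs =>
    if c = ' ' then [] :: splitSp cs
    else
      match splitSp cs with
      | [] => [[c]]
      | w :: ws => (c :: w) :: ws

theorem splitSp_ne_nil (l : List Char) : splitSp l ≠ [] := by
  cases l with
  | nil => simp [splitSp]
  | cons c cs =>
    unfold splitSp
    split_ifs
    · simp
    · cases hsp : splitSp cs <;> simp

theorem splitOn_go_eq (l : List Char) : ∀ (fuel : Nat) (cur : List Char) (acc : List (List Char))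
    (_ : l.length < fuel),
    PySem.Chars.splitOn.go [' '] fuel l cur acc =
      acc.reverse ++ (match splitSp l with
        | [] => []
        | w :: ws => (cur.reverse ++ w) :: ws) := by
  induction l with
  | nil =>
    intro fuel cur acc hf
    cases fuel with
    | zero => omega
    | succ f => simp [PySem.Chars.splitOn.go, splitSp]
  | cons c rest ih =>
    intro fuel cur acc hf
    cases fuel with
    | zero => omega
    | succ f =>
      obtain ⟨w, ws, hw⟩ := List.exists_cons_of_ne_nil (splitSp_ne_nil rest)
      by_cases hc : c = ' '
      · subst hc
        have hpre : ([' '] : List Char).isPrefixOf (' ' :: rest) = true := by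
          simp [List.isPrefixOf]
        rw [show PySem.Chars.splitOn.go [' '] (f + 1) (' ' :: rest) cur acc =
            PySem.Chars.splitOn.go [' '] f (List.drop 1 (' ' :: rest)) []
              (cur.reverse :: acc) by
          conv_lhs => rw [PySem.Chars.splitOn.go]
          simp [hpre]]
        rw [List.drop_one, List.tail_cons,
          ih f [] (cur.reverse :: acc) (by simpa using Nat.lt_of_succ_lt_succ hf)]
        rw [show splitSp (' ' :: rest) = [] :: splitSp rest by simp [splitSp]]
        rw [hw]
        simp
      · have hpre : ([' '] : List Char).isPrefixOf (c :: rest) = false := by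
          simp [List.isPrefixOf]
          exact fun h => hc h.symm
        rw [show PySem.Chars.splitOn.go [' '] (f + 1) (c :: rest) cur acc =
            PySem.Chars.splitOn.go [' '] f rest (c :: cur) acc by
          conv_lhs => rw [PySem.Chars.splitOn.go]
          simp [hpre]]
        rw [ih f (c :: cur) acc (by simpa using Nat.lt_of_succ_lt_succ hf)]
        rw [show splitSp (c :: rest) = match splitSp rest with
            | [] => [[c]] | w :: ws => (c :: w) :: ws by simp [splitSp, hc]]
        rw [hw]
        simp

theorem splitOn_eq_splitSp (l : List Char) :
    PySem.Chars.splitOn l [' '] = splitSp l := by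
  unfold PySem.Chars.splitOn
  rw [splitOn_go_eq l (l.length + 1) [] [] (by omega)]
  obtain ⟨w, ws, hw⟩ := List.exists_cons_of_ne_nil (splitSp_ne_nil l)
  rw [hw]
  simp

-- B's per-word gap rule, with an explicit previous character
def gapsFrom : Char → List Char → List Char
  | _, [] => []
  | p, c :: cs =>
    (if PySem.Chars.islower p && PySem.Chars.isupper c then [' ', c] else [c]) ++ gapsFrom c cs

theorem gapsFrom_cons (p c : Char) (cs : List Char) :
    gapsFrom p (c :: cs) =
      (if PySem.Chars.islower p && PySem.Chars.isupper c then [' ', c] else [c])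
        ++ gapsFrom c cs := rfl

theorem gapsZip (rest : List Char) : ∀ (c1 : Char),
    ((c1 :: rest).zip rest).flatMap (fun ab =>
        if PySem.Chars.islower ab.1 && PySem.Chars.isupper ab.2 then [' ', ab.2] else [ab.2]) =
      gapsFrom c1 rest := by
  induction rest with
  | nil => intro c1; simp [gapsFrom]
  | cons b t ih =>
    intro c1
    simp only [List.zip_cons_cons, List.flatMap_cons]
    rw [ih b]
    rfl

theorem prettyWord_cons (c : Char) (w : List Char) :
    prettyWord (c :: w) = PySem.Chars.upperChar c :: gapsFrom (PySem.Chars.upperChar c) w := by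
  cases w with
  | nil => simp [prettyWord, gapsFrom]
  | cons c1 rest =>
    rw [show prettyWord (c :: c1 :: rest) = PySem.Chars.upperChar c :: c1 ::
        (((c1 :: rest).zip rest).flatMap (fun ab =>
          if PySem.Chars.islower ab.1 && PySem.Chars.isupper ab.2 then [' ', ab.2] else [ab.2]))
      from rfl]
    rw [gapsZip rest c1, gapsFrom_cons, islower_upperChar]
    simp

theorem goA_space (l : List Char) : goA (some ' ') l = goA none l := by
  cases l with
  | nil => rfl
  | cons c cs => simp [goA, islower_space]

theorem goA_word (w : List Char) : ∀ (p : Char) (r : List Char), p ≠ ' ' →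
    (∀ c ∈ w, c ≠ ' ') →
    goA (some p) (w ++ r) = gapsFrom p w ++ goA (some (w.getLastD p)) r := by
  induction w with
  | nil => intro p r _ _; simp [gapsFrom]
  | cons c cs ih =>
    intro p r hp hw
    have hc : c ≠ ' ' := hw c (by simp)
    have hcs : ∀ x ∈ cs, x ≠ ' ' := fun x hx => hw x (by simp [hx])
    rw [List.cons_append]
    by_cases hs : (PySem.Chars.islower p && PySem.Chars.isupper c) = true
    · have hup : PySem.Chars.upperChar c = c :=
        upperChar_of_isupper c ((Bool.and_eq_true _ _ ▸ hs).2)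
      rw [show goA (some p) (c :: (cs ++ r)) =
          ' ' :: PySem.Chars.upperChar c :: goA (some (PySem.Chars.upperChar c)) (cs ++ r) by
        simp only [goA, hs, if_true]]
      rw [hup, ih c r hc hcs, gapsFrom_cons, hs, List.getLastD_cons]
      simp
    · have hs' := Bool.not_eq_true _ ▸ hs
      have hcond : ¬((some p : Option Char) = none ∨ (some p : Option Char) = some ' ') := by
        simp [hp]
      rw [show goA (some p) (c :: (cs ++ r)) = c :: goA (some c) (cs ++ r) by
        simp only [goA, hs', Bool.false_eq_true, if_false]
        rw [if_neg hcond]]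
      rw [ih c r hc hcs, gapsFrom_cons, hs', List.getLastD_cons]
      simp

theorem getLastD_ne_space (w : List Char) : ∀ (p : Char), (∀ c ∈ w, c ≠ ' ') → p ≠ ' ' →
    w.getLastD p ≠ ' ' := by
  induction w with
  | nil => intro p _ hp; simpa using hp
  | cons a w' ih =>
    intro p hw _
    rw [List.getLastD_cons]
    exact ih a (fun c hc => hw c (by simp [hc])) (hw a (by simp))

theorem dropWhile_head_not {α : Type} (p : α → Bool) (l : List α) :
    ∀ (x : α) (r : List α), l.dropWhile p = x :: r → p x = false := by
  induction l with
  | nil => intro x r h; simp [List.dropWhile] at h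
  | cons a t ih =>
    intro x r h
    rw [List.dropWhile_cons] at h
    by_cases ha : p a
    · rw [if_pos ha] at h; exact ih x r h
    · rw [if_neg ha] at h
      cases h
      simpa using ha

theorem splitSp_word (w : List Char) : ∀ (r : List Char), (∀ c ∈ w, c ≠ ' ') →
    splitSp (w ++ r) = match splitSp r with
      | [] => []
      | q :: qs => (w ++ q) :: qs := by
  induction w with
  | nil =>
    intro r _
    obtain ⟨q, qs, hq⟩ := List.exists_cons_of_ne_nil (splitSp_ne_nil r)
    simp [hq]
  | cons a w' ih =>
    intro r hw
    have ha : a ≠ ' ' := hw a (by simp)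
    rw [List.cons_append]
    rw [show splitSp (a :: (w' ++ r)) = match splitSp (w' ++ r) with
        | [] => [[a]] | q :: qs => (a :: q) :: qs by simp [splitSp, ha]]
    rw [ih r (fun c hc => hw c (by simp [hc]))]
    obtain ⟨q, qs, hq⟩ := List.exists_cons_of_ne_nil (splitSp_ne_nil r)
    rw [hq]
    simp

theorem goA_spec (n : Nat) : ∀ (l : List Char), l.length ≤ n →
    goA none l = PySem.Chars.join [' '] ((splitSp l).map prettyWord) := by
  induction n with
  | zero =>
    intro l hl
    rw [List.length_eq_zero_iff.mp (Nat.le_zero.mp hl)]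
    simp [goA, splitSp, prettyWord, PySem.Chars.join_singleton]
  | succ n ih =>
    intro l hl
    cases l with
    | nil => simp [goA, splitSp, prettyWord, PySem.Chars.join_singleton]
    | cons c cs =>
      by_cases hc : c = ' '
      · subst hc
        rw [show goA none (' ' :: cs) = ' ' :: goA (some ' ') cs by
          simp [goA, upperChar_space]]
        rw [goA_space, ih cs (by simpa using hl)]
        rw [show splitSp (' ' :: cs) = [] :: splitSp cs by simp [splitSp]]
        obtain ⟨q, qs, hq⟩ := List.exists_cons_of_ne_nil (splitSp_ne_nil cs)
        rw [hq]
        simp only [List.map_cons, PySem.Chars.join_cons_cons]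
        simp [prettyWord]
      · have hsplit : goA none (c :: cs) =
            PySem.Chars.upperChar c :: goA (some (PySem.Chars.upperChar c)) cs := by
          simp [goA]
        have hw : ∀ x ∈ cs.takeWhile (fun x => x != ' '), x ≠ ' ' := by
          intro x hx
          have := List.mem_takeWhile_imp hx
          simpa using this
        set w := cs.takeWhile (fun x => x != ' ') with hwdef
        have hcw : ∀ x ∈ c :: w, x ≠ ' ' := by
          intro x hx
          rcases List.mem_cons.mp hx with h1 | h2
          · rwa [h1]
          · exact hw x h2
        have hup : PySem.Chars.upperChar c ≠ ' ' := upperChar_ne_space c hc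
        cases hr : cs.dropWhile (fun x => x != ' ') with
        | nil =>
          have hcs : cs = w := by
            have := List.takeWhile_append_dropWhile (p := fun x => x != ' ') (l := cs)
            rw [hr] at this
            simpa using this.symm
          rw [hsplit, hcs, show (w : List Char) = w ++ [] by simp,
            goA_word w (PySem.Chars.upperChar c) [] hup hw]
          rw [show (c :: (w ++ [])) = ((c :: w) ++ ([] : List Char)) from rfl,
            splitSp_word (c :: w) [] hcw]
          rw [show splitSp ([] : List Char) = [[]] from rfl]
          simp only [List.append_nil, List.map_cons, List.map_nil, PySem.Chars.join_singleton]
          rw [prettyWord_cons]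
          simp [goA]
        | cons x r' =>
          have hx : x = ' ' := by
            have := dropWhile_head_not (fun x => x != ' ') cs x r' hr
            simpa using this
          subst hx
          have hcs : cs = w ++ ' ' :: r' := by
            have := List.takeWhile_append_dropWhile (p := fun x => x != ' ') (l := cs)
            rw [hr] at this
            exact this.symm
          have hlast : w.getLastD (PySem.Chars.upperChar c) ≠ ' ' :=
            getLastD_ne_space w (PySem.Chars.upperChar c) hw hup
          have hstep : goA (some (w.getLastD (PySem.Chars.upperChar c))) (' ' :: r') =
              ' ' :: goA (some ' ') r' := by
            rw [show goA (some (w.getLastD (PySem.Chars.upperChar c))) (' ' :: r') =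
                (if PySem.Chars.islower (w.getLastD (PySem.Chars.upperChar c))
                    && PySem.Chars.isupper ' ' then
                  ' ' :: PySem.Chars.upperChar ' ' :: goA (some (PySem.Chars.upperChar ' ')) r'
                else if (some (w.getLastD (PySem.Chars.upperChar c)) : Option Char) = none ∨
                    (some (w.getLastD (PySem.Chars.upperChar c)) : Option Char) = some ' ' then
                  PySem.Chars.upperChar ' ' :: goA (some (PySem.Chars.upperChar ' ')) r'
                else ' ' :: goA (some ' ') r') from rfl]
            rw [isupper_space]
            simp [upperChar_space]
          have hlen : r'.length ≤ n := by
            have hln : cs.length ≤ n := by simpa using hl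
            rw [hcs] at hln
            simp at hln
            omega
          rw [hsplit, hcs, goA_word w (PySem.Chars.upperChar c) (' ' :: r') hup hw,
            hstep, goA_space, ih r' hlen]
          rw [show (c :: (w ++ ' ' :: r')) = ((c :: w) ++ (' ' :: r')) from rfl,
            splitSp_word (c :: w) (' ' :: r') hcw]
          rw [show splitSp (' ' :: r') = [] :: splitSp r' by simp [splitSp]]
          obtain ⟨q, qs, hq⟩ := List.exists_cons_of_ne_nil (splitSp_ne_nil r')
          rw [hq]
          simp only [List.append_nil, List.map_cons, PySem.Chars.join_cons_cons]
          rw [prettyWord_cons]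
          simp

-- ===== VERDICT (by name: the statement is the Claim_ definition above) =====
theorem pretty_spec : Claim_equal_pretty := by
  intro text _
  unfold Spec_pretty pretty pretty_alt
  simp only []
  congr 1
  rw [foldl_goA _ (none, []), splitOn_eq_splitSp]
  rw [goA_spec (PySem.Chars.strip (PySem.Chars.replace (PySem.Chars.replace text.toList ['_'] [' ']) ['-'] [' '])).length _ (le_refl _)]
  simp
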